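-- pv_equiv track=rewrite | github.com/kalayfurkan/Web-Crawler-ITU-AI-Aided-Course-Vibecoding-Project | search.py | _count_phrase_occurrences
-- ===== SOURCE A (Python) =====
-- def _count_phrase_occurrences(positions_by_word, query_words):
--     """Count how many times *query_words* appear consecutively.
--
--     positions_by_word: dict  word -> set of int positions
--     query_words:       list  e.g. ["new", "york", "city"]
--
--     Returns the number of times the full phrase appears as a
--     consecutive sequence in the original page text.
--     """
--     if len(query_words) < 2:
--         return 0
--
--     first = query_words[0]
--     if first not in positions_by_word:
--         return 0
--
--     count = 0
--     for start in positions_by_word[first]: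
--         ok = True
--         for offset, w in enumerate(query_words[1:], 1):
--             if (start + offset) not in positions_by_word.get(w, set()):
--                 ok = False
--                 break
--         if ok:
--             count += 1
--     return count
-- ===== SOURCE B (Python) =====
-- def _count_phrase_occurrences(positions_by_word, query_words):
--     if len(query_words) < 2:
--         return 0
--     if query_words[0] not in positions_by_word:
--         return 0
--     k = len(query_words)
--     tally = {}
--     for offset, w in enumerate(query_words):
--         for p in positions_by_word.get(w, set()):
--             s = p - offset
--             tally[s] = tally.get(s, 0) + 1
--     count = 0
--     for v in tally.values():
--         if v == k:
--             count += 1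
--     return count
-- ===== Notes on version B (the rewrite author's own statement) =====
-- stated objective: alternative
-- what changed: Replaces A's per-start nested membership scan (inner loop with early break over each candidate start) by a single tallying pass: a counter dict maps each shifted position p-offset to how many (offset, word) pairs hit it, and the answer is the number of tally values equal to the phrase length.
import Mathlib
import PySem

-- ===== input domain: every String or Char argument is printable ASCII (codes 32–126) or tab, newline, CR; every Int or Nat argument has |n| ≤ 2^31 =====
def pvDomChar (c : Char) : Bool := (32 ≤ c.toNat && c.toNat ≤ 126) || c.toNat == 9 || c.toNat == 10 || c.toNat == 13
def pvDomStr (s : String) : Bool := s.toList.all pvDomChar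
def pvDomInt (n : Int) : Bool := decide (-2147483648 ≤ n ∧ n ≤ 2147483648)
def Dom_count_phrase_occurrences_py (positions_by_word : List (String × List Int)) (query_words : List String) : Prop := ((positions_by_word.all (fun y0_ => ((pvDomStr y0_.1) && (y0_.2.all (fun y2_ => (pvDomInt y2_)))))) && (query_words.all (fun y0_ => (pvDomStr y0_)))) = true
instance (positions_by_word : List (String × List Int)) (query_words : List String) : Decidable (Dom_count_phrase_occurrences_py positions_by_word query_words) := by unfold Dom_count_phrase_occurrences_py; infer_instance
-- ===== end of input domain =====

-- B replaces A's per-start nested membership scan (with early break) by one tallying pass: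
-- a counter dict of shifted positions over all (offset, word) pairs, then a count of tally
-- values equal to the phrase length; proved equal to A on the whole domain.

-- ===== PORT A =====
-- inner loop of A: 'for offset, w in enumerate(query_words[1:], 1): if (start + offset) not in …: break'
def okLoopA (d : PySem.Dict String (List Int)) (start : Int) : List String → Int → Bool
  | [], _ => true
  | w :: ws, off =>
    if (PySem.Set.ofList (d.getD w [])).contains (start + off) then okLoopA d start ws (off + 1)
    else false

def count_phrase_occurrences_py (positions_by_word : List (String × List Int)) (query_words : List String) : Int :=
  if query_words.length < 2 then 0 else
  match query_words with
  | [] => 0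
  | first :: rest =>
    let d := PySem.Dict.ofList positions_by_word
    match d.get? first with
    | none => 0
    | some fv =>
      (PySem.Set.ofList fv).foldl (fun count start => if okLoopA d start rest 1 then count + 1 else count) 0

-- ===== PORT B =====
-- B's tally loop: 'for offset, w in enumerate(query_words): for p in …get(w, set()): tally[p - offset] += 1'
def tallyB (d : PySem.Dict String (List Int)) (qw : List String) : PySem.Dict Int Int :=
  (PySem.List.enumerate qw 0).foldl
    (fun t ow => (PySem.Set.ofList (d.getD ow.2 [])).foldl
                   (fun t p => t.modify (p - ow.1) 0 (· + 1)) t)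
    PySem.Dict.empty

def count_phrase_occurrences_py_alt (positions_by_word : List (String × List Int)) (query_words : List String) : Int :=
  if query_words.length < 2 then 0 else
  match query_words with
  | [] => 0
  | first :: _ =>
    let d := PySem.Dict.ofList positions_by_word
    if d.contains first = false then 0 else
    let k : Int := (query_words.length : Int)
    let tally := tallyB d query_words
    tally.values.foldl (fun count v => if v == k then count + 1 else count) 0

-- ===== PRECONDITION & SPEC =====
def Spec_count_phrase_occurrences_py (positions_by_word : List (String × List Int)) (query_words : List String) (out : Int) : Prop := out = count_phrase_occurrences_py_alt positions_by_word query_words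
instance (positions_by_word : List (String × List Int)) (query_words : List String) (out : Int) : Decidable (Spec_count_phrase_occurrences_py positions_by_word query_words out) := by unfold Spec_count_phrase_occurrences_py; infer_instance

-- ===== CLAIM (what is proved, stated in full; the proofs are below) =====
def Claim_equal_count_phrase_occurrences_py : Prop := ∀ (positions_by_word : List (String × List Int)) (query_words : List String), Dom_count_phrase_occurrences_py positions_by_word query_words → Spec_count_phrase_occurrences_py positions_by_word query_words (count_phrase_occurrences_py positions_by_word query_words)

-- ===== LEMMAS AND PROOFS =====

lemma okLoopA_iff (d : PySem.Dict String (List Int)) (s : Int) (ws : List String) :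
    ∀ off : Int, okLoopA d s ws off = true ↔
      ∀ ow ∈ PySem.List.enumerate ws off,
        (PySem.Set.ofList (d.getD ow.2 [])).contains (s + ow.1) = true := by
  induction ws with
  | nil => intro off; simp [okLoopA, PySem.List.enumerate_nil]
  | cons w ws ih =>
    intro off
    rw [PySem.List.enumerate_cons, okLoopA]
    by_cases h : (PySem.Set.ofList (d.getD w [])).contains (s + off) = true
    · simp [ih (off + 1)]
    · rw [if_neg h]
      simp only [Bool.false_eq_true, false_iff]
      intro hall
      exact h (hall (off, w) (List.mem_cons_self))

lemma getD_innerTally (d : PySem.Dict String (List Int)) (w : String) (off : Int)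
    (t : PySem.Dict Int Int) (s : Int) :
    ((PySem.Set.ofList (d.getD w [])).foldl (fun t p => t.modify (p - off) 0 (· + 1)) t).getD s 0
      = t.getD s 0 + (if (PySem.Set.ofList (d.getD w [])).contains (s + off) = true then 1 else 0) := by
  have hmap : (PySem.Set.ofList (d.getD w [])).foldl (fun t p => t.modify (p - off) 0 (· + 1)) t
      = ((PySem.Set.ofList (d.getD w [])).map (fun p => p - off)).foldl (fun t x => t.modify x 0 (· + 1)) t := by
    rw [List.foldl_map]
  rw [hmap, PySem.Dict.getD_foldl_modify_add_one]
  have hinj : Function.Injective (fun p : Int => p - off) := fun a b h => by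
    simpa using congrArg (· + off) h
  have hc : ((PySem.Set.ofList (d.getD w [])).map (fun p => p - off)).count s
      = (PySem.Set.ofList (d.getD w [])).count (s + off) := by
    have := List.count_map_of_injective (x := s + off) (PySem.Set.ofList (d.getD w [])) (fun p : Int => p - off) hinj
    simpa using this
  rw [hc]
  by_cases hm : (s + off) ∈ PySem.Set.ofList (d.getD w [])
  · rw [List.count_eq_one_of_mem (PySem.Set.nodup_ofList _) hm]
    simp [hm]
  · rw [List.count_eq_zero_of_not_mem hm]
    simp [hm]

lemma getD_tallyLoop (d : PySem.Dict String (List Int)) (ws : List String) :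
    ∀ (off : Int) (t : PySem.Dict Int Int) (s : Int),
      ((PySem.List.enumerate ws off).foldl
          (fun t ow => (PySem.Set.ofList (d.getD ow.2 [])).foldl
                         (fun t p => t.modify (p - ow.1) 0 (· + 1)) t) t).getD s 0
        = t.getD s 0 + (((PySem.List.enumerate ws off).countP
            (fun ow => (PySem.Set.ofList (d.getD ow.2 [])).contains (s + ow.1)) : Nat) : Int) := by
  induction ws with
  | nil => intro off t s; simp [PySem.List.enumerate_nil]
  | cons w ws ih =>
    intro off t s
    rw [PySem.List.enumerate_cons, List.foldl_cons, List.countP_cons, ih, getD_innerTally]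
    by_cases h : (PySem.Set.ofList (d.getD w [])).contains (s + off) = true
    · rw [if_pos h, if_pos h]; push_cast; ring
    · rw [if_neg h, if_neg h]; push_cast; ring

lemma nodup_keys_tallyLoop (d : PySem.Dict String (List Int)) (l : List (Int × String)) :
    ∀ t : PySem.Dict Int Int, t.keys.Nodup →
      (l.foldl (fun t ow => (PySem.Set.ofList (d.getD ow.2 [])).foldl
                  (fun t p => t.modify (p - ow.1) 0 (· + 1)) t) t).keys.Nodup := by
  induction l with
  | nil => intro t h; simpa using h
  | cons ow l ih =>
    intro t h
    rw [List.foldl_cons]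
    exact ih _ (PySem.Dict.nodup_keys_foldl_modify_key
      (PySem.Set.ofList (d.getD ow.2 [])) (fun p => p - ow.1) 0 (fun _ _ => (· + 1)) t h)

lemma getD_of_not_mem_keys (t : PySem.Dict Int Int) (s : Int) (h : ¬ s ∈ t.keys) :
    t.getD s 0 = 0 := by
  apply PySem.Dict.getD_of_not_contains
  rw [← Bool.not_eq_true, PySem.Dict.contains_iff_mem_keys]
  exact h

-- main counting lemma
lemma main_eq (d : PySem.Dict String (List Int)) (first : String) (rest : List String)
    (fv : List Int) (hget : d.get? first = some fv) (hrest : rest ≠ []) :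
    (PySem.Set.ofList fv).foldl (fun count start => if okLoopA d start rest 1 then count + 1 else count) (0:Int)
      = (tallyB d (first :: rest)).values.foldl
          (fun count v => if v == (((first :: rest).length : Nat) : Int) then count + 1 else count) (0:Int) := by
  have hfv : d.getD first [] = fv := PySem.Dict.getD_of_get?_eq_some d [] hget
  set k : Int := (((first :: rest).length : Nat) : Int) with hk
  set tally := tallyB d (first :: rest) with htally
  -- getD characterisation
  have hgetD : ∀ s : Int, tally.getD s 0
      = (((PySem.List.enumerate (first :: rest) 0).countP
          (fun ow => (PySem.Set.ofList (d.getD ow.2 [])).contains (s + ow.1)) : Nat) : Int) := by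
    intro s
    rw [htally]; unfold tallyB
    rw [getD_tallyLoop]
    simp
  have hchar : ∀ s : Int, (tally.getD s 0 = k) ↔ (s ∈ PySem.Set.ofList fv ∧ okLoopA d s rest 1 = true) := by
    intro s
    rw [hgetD, hk]
    have hlen : (first :: rest).length = (PySem.List.enumerate (first :: rest) 0).length := by
      rw [PySem.List.length_enumerate]
    rw [hlen]
    rw [Int.natCast_inj]
    rw [List.countP_eq_length]
    rw [PySem.List.enumerate_cons]
    constructor
    · intro h
      have h0 := h (0, first) (by simp)
      have h1 : ∀ ow ∈ PySem.List.enumerate rest 1,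
          (PySem.Set.ofList (d.getD ow.2 [])).contains (s + ow.1) = true := by
        intro ow how; exact h ow (by simp [how])
      refine ⟨?_, (okLoopA_iff d s rest 1).mpr h1⟩
      rw [← PySem.Set.contains_iff, ← hfv]
      simpa using h0
    · rintro ⟨hm, hok⟩
      intro ow how
      rcases List.mem_cons.mp how with h | h
      · subst h; simp [hfv, hm]
      · exact (okLoopA_iff d s rest 1).mp hok ow h
  have hk2 : (2:Int) ≤ k := by
    rw [hk]
    have : 2 ≤ (first :: rest).length := by
      cases rest with
      | nil => exact absurd rfl hrest
      | cons a l => simp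
    exact_mod_cast this
  have hnodup : tally.keys.Nodup := by
    rw [htally]; unfold tallyB
    exact nodup_keys_tallyLoop d _ PySem.Dict.empty (by simp [PySem.Dict.keys_empty])
  -- both folds are countP
  rw [PySem.List.foldl_count_if, PySem.List.foldl_count_if, zero_add, zero_add]
  congr 1
  rw [PySem.Dict.values_eq_map_keys tally hnodup 0]
  rw [List.countP_map]
  rw [List.countP_eq_length_filter, List.countP_eq_length_filter]
  have hperm : ((PySem.Set.ofList fv).filter (fun s => okLoopA d s rest 1)).Perm
      (tally.keys.filter (fun s => ((fun v => v == k) ∘ fun s => tally.getD s 0) s)) := by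
    apply (List.perm_ext_iff_of_nodup (List.Nodup.filter _ (PySem.Set.nodup_ofList fv))
      (List.Nodup.filter _ hnodup)).mpr
    intro x
    simp only [List.mem_filter, Function.comp, beq_iff_eq]
    constructor
    · rintro ⟨hm, hok⟩
      have hx : tally.getD x 0 = k := (hchar x).mpr ⟨hm, hok⟩
      refine ⟨?_, hx⟩
      by_contra hnk
      rw [getD_of_not_mem_keys tally x hnk] at hx
      omega
    · rintro ⟨-, hx⟩
      exact (hchar x).mp hx
  exact hperm.length_eq

-- ===== VERDICT (by name: the statement is the Claim_ definition above) =====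
theorem count_phrase_occurrences_py_spec : Claim_equal_count_phrase_occurrences_py := by
  intro pbw qw _
  unfold Spec_count_phrase_occurrences_py
  unfold count_phrase_occurrences_py count_phrase_occurrences_py_alt
  cases qw with
  | nil => rfl
  | cons first rest =>
    by_cases hlen : (first :: rest).length < 2
    · have h0 : rest = [] := by cases rest with
        | nil => rfl
        | cons a l => exfalso; simp at hlen
      subst h0; simp
    · simp only [hlen, if_false]
      cases hget : (PySem.Dict.ofList pbw).get? first with
      | none =>
        have hc : (PySem.Dict.ofList pbw).contains first = false := by
          rw [PySem.Dict.contains_eq_isSome_get?, hget]; rfl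
        simp [hc]
      | some fv =>
        have hc : (PySem.Dict.ofList pbw).contains first = true := by
          rw [PySem.Dict.contains_eq_isSome_get?, hget]; rfl
        have hrest : rest ≠ [] := by
          intro h; subst h; simp at hlen
        simp only [hc, Bool.true_eq_false, if_false]
        exact main_eq (PySem.Dict.ofList pbw) first rest fv hget hrest
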